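-- pv_equiv track=rewrite | github.com/alexsloot00/Material-Requirements-Planning | mrp_functions.py | netting
-- ===== SOURCE A (Python) =====
-- from typing import List
--
-- def netting(
--     gross_requirements: List[int],
--     initial_inventory: int,
--     planned_receipts: List[int],
--     safety_stock: int,
-- ) -> [List[int], List[int]]:
--     """Obtain net requirements update the inventory over the subperiods"""
--     sub_periods = len(gross_requirements)
--     inventory = []
--     net_requirements = []
--     net_requirements.append(0)
--     inventory.append(initial_inventory)
--     for i in range(1, sub_periods):
--         temp = (
--             inventory[i - 1]
--             - gross_requirements[i]
--             + planned_receipts[i]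
--             + net_requirements[i - 1]
--         )
--         inventory.append(temp)
--         net_requirements.append(max(0, safety_stock - inventory[i]))
--
--     return net_requirements, inventory
-- ===== SOURCE B (Python) =====
-- def netting(
--     gross_requirements,
--     initial_inventory,
--     planned_receipts,
--     safety_stock,
-- ):
--     """Prefix-sum + running-minimum formulation: inventory[i] is computed in
--     closed form as P[i] + max(initial_inventory, safety_stock - min(P[1..i-1])),
--     where P is the prefix sum of planned_receipts[i] - gross_requirements[i]."""
--     sub_periods = len(gross_requirements)
--     pref = []
--     s = 0
--     for i in range(1, sub_periods):
--         s += planned_receipts[i] - gross_requirements[i]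
--         pref.append(s)
--     inventory = [initial_inventory]
--     if pref:
--         inventory.append(initial_inventory + pref[0])
--         runmin = pref[0]
--         for s_i in pref[1:]:
--             inventory.append(s_i + max(initial_inventory, safety_stock - runmin))
--             runmin = min(runmin, s_i)
--     net_requirements = [0] + [max(0, safety_stock - v) for v in inventory[1:]]
--     return net_requirements, inventory
-- ===== Notes on version B (the rewrite author's own statement) =====
-- stated objective: alternative
-- what changed: B abandons the coupled inventory/net recurrence entirely: it first builds prefix sums P[i] of planned_receipts[i]-gross_requirements[i], then computes each inventory value in closed form as P[i] + max(initial_inventory, safety_stock - min(P[1..i-1])) using a running minimum, and finally derives net_requirements as max(0, safety_stock - inventory[i]).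
import Mathlib
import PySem

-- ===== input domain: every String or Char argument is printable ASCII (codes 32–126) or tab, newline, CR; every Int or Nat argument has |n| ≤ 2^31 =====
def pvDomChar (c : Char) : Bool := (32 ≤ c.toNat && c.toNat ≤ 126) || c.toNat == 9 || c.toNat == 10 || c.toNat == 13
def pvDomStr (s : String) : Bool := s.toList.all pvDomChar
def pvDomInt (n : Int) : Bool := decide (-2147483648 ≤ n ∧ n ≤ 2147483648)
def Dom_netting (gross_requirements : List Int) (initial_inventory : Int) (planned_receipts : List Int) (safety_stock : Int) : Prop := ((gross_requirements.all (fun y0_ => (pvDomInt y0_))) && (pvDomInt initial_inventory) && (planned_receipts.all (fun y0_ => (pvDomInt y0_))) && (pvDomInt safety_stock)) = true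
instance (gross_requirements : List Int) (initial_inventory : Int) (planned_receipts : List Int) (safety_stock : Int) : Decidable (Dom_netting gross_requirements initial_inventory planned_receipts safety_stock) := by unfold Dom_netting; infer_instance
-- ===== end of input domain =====

-- B replaces A's coupled inventory/net recurrence by a closed form per period:
-- prefix sums of (planned - gross) plus a running minimum ('alternative' objective).

-- ===== PORT A =====
-- A's loop body (the Python `for i in range(1, sub_periods)` body), as a named helper.
-- The two append-lists are carried reversed (head = last appended element).
def nettingStep (gross_requirements planned_receipts : List Int) (safety_stock : Int)
    (st : List Int × List Int) (i : Int) : List Int × List Int :=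
  let netRev := st.1
  let invRev := st.2
  let temp := invRev.headD 0
    - (PySem.List.pyGetD gross_requirements i 0)
    + (PySem.List.pyGetD planned_receipts i 0)
    + netRev.headD 0
  (max 0 (safety_stock - temp) :: netRev, temp :: invRev)

def netting (gross_requirements : List Int) (initial_inventory : Int) (planned_receipts : List Int) (safety_stock : Int) : List Int × List Int :=
  let sub_periods : Int := gross_requirements.length
  let st := (PySem.List.pyRange 1 sub_periods 1).foldl
    (nettingStep gross_requirements planned_receipts safety_stock)
    ([0], [initial_inventory])
  (st.1.reverse, st.2.reverse)

-- ===== PORT B =====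
-- B pass 1: prefix sums of planned[i] - gross[i]; state = (running sum, pref reversed).
def prefStep (gross_requirements planned_receipts : List Int)
    (st : Int × List Int) (i : Int) : Int × List Int :=
  let s := st.1 + (PySem.List.pyGetD planned_receipts i 0)
               - (PySem.List.pyGetD gross_requirements i 0)
  (s, s :: st.2)

-- B pass 2 loop body: state = (inventory reversed, running minimum of prefix sums).
def invStep (initial_inventory safety_stock : Int)
    (st : List Int × Int) (s_i : Int) : List Int × Int :=
  ((s_i + max initial_inventory (safety_stock - st.2)) :: st.1, min st.2 s_i)

def netting_alt (gross_requirements : List Int) (initial_inventory : Int) (planned_receipts : List Int) (safety_stock : Int) : List Int × List Int :=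
  let sub_periods : Int := gross_requirements.length
  let pref := ((PySem.List.pyRange 1 sub_periods 1).foldl
    (prefStep gross_requirements planned_receipts) (0, [])).2.reverse
  let inventory :=
    match pref with
    | [] => [initial_inventory]
    | s0 :: rest =>
      ((rest.foldl (invStep initial_inventory safety_stock)
        ([initial_inventory + s0, initial_inventory], s0)).1).reverse
  let net_requirements := 0 :: (inventory.drop 1).map (fun v => max 0 (safety_stock - v))
  (net_requirements, inventory)

-- ===== PRECONDITION & SPEC =====
-- Pre_ excludes exactly the inputs on which Python A (and B) raise IndexError:
-- planned_receipts shorter than gross_requirements while the loop runs (len(gross) >= 2).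
def Pre_netting (gross_requirements : List Int) (initial_inventory : Int) (planned_receipts : List Int) (safety_stock : Int) : Prop :=
  gross_requirements.length ≤ 1 ∨ gross_requirements.length ≤ planned_receipts.length
instance (gross_requirements : List Int) (initial_inventory : Int) (planned_receipts : List Int) (safety_stock : Int) : Decidable (Pre_netting gross_requirements initial_inventory planned_receipts safety_stock) := by unfold Pre_netting; infer_instance
def pvWitness_netting : List Int × Int × List Int × Int := ([4, 2, 3], 5, [0, 1, 6], 3)

def Spec_netting (gross_requirements : List Int) (initial_inventory : Int) (planned_receipts : List Int) (safety_stock : Int) (out : List Int × List Int) : Prop := out = netting_alt gross_requirements initial_inventory planned_receipts safety_stock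
instance (gross_requirements : List Int) (initial_inventory : Int) (planned_receipts : List Int) (safety_stock : Int) (out : List Int × List Int) : Decidable (Spec_netting gross_requirements initial_inventory planned_receipts safety_stock out) := by unfold Spec_netting; infer_instance

-- ===== CLAIM (what is proved, stated in full; the proofs are below) =====
def Claim_equal_netting : Prop := ∀ (gross_requirements : List Int) (initial_inventory : Int) (planned_receipts : List Int) (safety_stock : Int), Dom_netting gross_requirements initial_inventory planned_receipts safety_stock → Pre_netting gross_requirements initial_inventory planned_receipts safety_stock → Spec_netting gross_requirements initial_inventory planned_receipts safety_stock (netting gross_requirements initial_inventory planned_receipts safety_stock)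

-- ===== LEMMAS AND PROOFS =====

-- Proof-side middle form: A's recurrence with the net term folded into the inventory.
def midStep (gross_requirements planned_receipts : List Int) (safety_stock : Int)
    (acc : List Int) (i : Int) : List Int :=
  let base := if i == 1 then acc.headD 0 else max (acc.headD 0) safety_stock
  (base - (PySem.List.pyGetD gross_requirements i 0)
        + (PySem.List.pyGetD planned_receipts i 0)) :: acc

-- loop invariant 1: after m >= 1 iterations, A's state is mid's inventory plus the derived
-- net list (reversed), and mid's inventory has length m.
theorem pv_loop_inv (g p : List Int) (init ss : Int) (m : Nat) (hm : 1 <= m) :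
    ((PySem.List.pyRange 1 (m : Int) 1).foldl (nettingStep g p ss) ([0], [init])
      = ((((PySem.List.pyRange 1 (m : Int) 1).foldl (midStep g p ss) [init]).dropLast.map
            (fun v => max 0 (ss - v))) ++ [0],
         (PySem.List.pyRange 1 (m : Int) 1).foldl (midStep g p ss) [init]))
    ∧ ((PySem.List.pyRange 1 (m : Int) 1).foldl (midStep g p ss) [init]).length = m := by
  induction m with
  | zero => omega
  | succ k ih =>
    by_cases hk : 1 ≤ k
    · obtain ⟨ihA, ihL⟩ := ih hk
      have hsplit : PySem.List.pyRange 1 ((k : Int) + 1) 1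
          = PySem.List.pyRange 1 (k : Int) 1 ++ [(k : Int)] :=
        PySem.List.pyRange_one_succ_right (by exact_mod_cast hk)
      have hcast : ((k + 1 : Nat) : Int) = (k : Int) + 1 := by push_cast; ring
      rw [hcast, hsplit, List.foldl_append, List.foldl_append, ihA]
      set invB := (PySem.List.pyRange 1 (k : Int) 1).foldl (midStep g p ss) [init] with hinv
      obtain ⟨h, t, hht⟩ : ∃ h t, invB = h :: t :=
        List.exists_cons_of_ne_nil (by intro hc; rw [hc] at ihL; simp at ihL; omega)
      rw [hht] at ihL
      simp only [List.length_cons] at ihL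
      simp only [List.foldl_cons, List.foldl_nil]
      by_cases hk1 : k = 1
      · subst hk1
        have ht0 : t = [] := List.length_eq_zero_iff.mp (by omega)
        subst ht0
        constructor
        · simp [nettingStep, midStep, hht]
        · simp [midStep, hht]
      · have hne : ((k : Int) == 1) = false := by
          simp only [beq_eq_false_iff_ne, ne_eq]
          intro hc; omega
        obtain ⟨h2, t2, hht2⟩ : ∃ h2 t2, t = h2 :: t2 := by
          cases t with
          | nil => simp at ihL; omega
          | cons h2 t2 => exact ⟨h2, t2, rfl⟩
        constructor
        · simp only [nettingStep, midStep, hht, hht2, hne, List.headD_cons,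
            List.dropLast_cons₂, List.map_cons, List.cons_append, if_false, Bool.false_eq_true]
          have htemp : h - PySem.List.pyGetD g (k : Int) 0 + PySem.List.pyGetD p (k : Int) 0
                + max 0 (ss - h)
              = max h ss - PySem.List.pyGetD g (k : Int) 0 + PySem.List.pyGetD p (k : Int) 0 := by
            omega
          rw [htemp]
        · simp only [midStep, hht, hht2, List.length_cons]
          simp only [hht2, List.length_cons] at ihL
          omega
    · have hk0 : k = 0 := by omega
      subst hk0
      rw [show ((0 + 1 : Nat) : Int) = 1 by norm_num, PySem.List.pyRange_one_eq_nil le_rfl]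
      simp

-- loop invariant 2: for m >= 2, B's two passes reproduce mid's inventory list:
-- pref is nonempty (last prefix sum first when reversed back), the invStep fold over
-- pref's tail yields exactly mid's (reversed) inventory list paired with the running
-- minimum M, and max(head of mid, ss) has the closed form B uses at the next step.
theorem pv_pass_inv (g p : List Int) (init ss : Int) (m : Nat) (hm : 2 <= m) :
    ∃ q M, ((PySem.List.pyRange 1 (m : Int) 1).foldl (prefStep g p) (0, [])).2
          = ((PySem.List.pyRange 1 (m : Int) 1).foldl (prefStep g p) (0, [])).1 :: q
    ∧ (∀ s0 rest, ((PySem.List.pyRange 1 (m : Int) 1).foldl (prefStep g p) (0, [])).2.reverse = s0 :: rest →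
        rest.foldl (invStep init ss) ([init + s0, init], s0)
          = ((PySem.List.pyRange 1 (m : Int) 1).foldl (midStep g p ss) [init], M)
        ∧ max (((PySem.List.pyRange 1 (m : Int) 1).foldl (midStep g p ss) [init]).headD 0) ss
          = ((PySem.List.pyRange 1 (m : Int) 1).foldl (prefStep g p) (0, [])).1
            + max init (ss - M)) := by
  induction m with
  | zero => omega
  | succ k ih =>
    by_cases hk : 2 ≤ k
    · obtain ⟨q, M, hq, hrest⟩ := ih hk
      have hsplit : PySem.List.pyRange 1 ((k : Int) + 1) 1
          = PySem.List.pyRange 1 (k : Int) 1 ++ [(k : Int)] :=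
        PySem.List.pyRange_one_succ_right (by exact_mod_cast (by omega : 1 ≤ k))
      have hcast : ((k + 1 : Nat) : Int) = (k : Int) + 1 := by push_cast; ring
      rw [hcast, hsplit, List.foldl_append, List.foldl_append]
      set P := (PySem.List.pyRange 1 (k : Int) 1).foldl (prefStep g p) (0, []) with hP
      set mid := (PySem.List.pyRange 1 (k : Int) 1).foldl (midStep g p ss) [init] with hmid
      have hq' : P.2.reverse = q.reverse ++ [P.1] := by rw [hq]; simp
      obtain ⟨s0, rest, hsr⟩ : ∃ s0 rest, P.2.reverse = s0 :: rest := by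
        rw [hq']
        cases hqr : q.reverse with
        | nil => exact ⟨P.1, [], by simp⟩
        | cons a b => exact ⟨a, b ++ [P.1], by simp⟩
      obtain ⟨hfold, hmax⟩ := hrest s0 rest hsr
      refine ⟨P.1 :: q, min M (prefStep g p P (k : Int)).1, by simp [prefStep, hq], ?_⟩
      intro s0' rest' hsr'
      have hnew : ((prefStep g p P (k : Int)).2).reverse
          = P.2.reverse ++ [(prefStep g p P (k : Int)).1] := by simp [prefStep]
      simp only [List.foldl_cons, List.foldl_nil] at hsr' ⊢
      rw [hnew, hsr] at hsr'
      have hs0 : s0' = s0 := (List.cons.injEq .. ▸ hsr').1.symm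
      have hrest' : rest' = rest ++ [(prefStep g p P (k : Int)).1] :=
        ((List.cons.injEq .. ▸ hsr').2).symm
      subst hs0; subst hrest'
      rw [List.foldl_append, hfold]
      simp only [List.foldl_cons, List.foldl_nil]
      have hne : (((k : Int)) == 1) = false := by
        simp only [beq_eq_false_iff_ne, ne_eq]; intro hc; omega
      constructor
      · simp only [invStep, midStep, hne, if_false, Bool.false_eq_true, prefStep]
        congr 2
        omega
      · simp only [midStep, hne, if_false, Bool.false_eq_true, List.headD_cons, prefStep]
        omega
    · have hk1 : k = 1 := by omega
      subst hk1
      have h2 : PySem.List.pyRange 1 ((1 + 1 : Nat) : Int) 1 = [1] := by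
        rw [show (((1 + 1 : Nat)) : Int) = (1 : Int) + 1 by norm_num]
        exact PySem.List.pyRange_one_singleton 1
      rw [h2]
      simp only [List.foldl_cons, List.foldl_nil]
      refine ⟨[], 0 + PySem.List.pyGetD p 1 0 - PySem.List.pyGetD g 1 0, by simp [prefStep], ?_⟩
      intro s0 rest hsr
      simp only [prefStep, List.reverse_cons, List.reverse_nil, List.nil_append,
        List.cons.injEq] at hsr
      obtain ⟨hs0, hrest⟩ := hsr
      subst hrest
      subst hs0
      constructor
      · simp only [List.foldl_nil, midStep, List.headD_cons, beq_self_eq_true, if_true]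
        congr 2
        omega
      · simp only [midStep, List.headD_cons, beq_self_eq_true, if_true, prefStep]
        omega

-- ===== VERDICT (by name: the statement is the Claim_ definition above) =====
theorem netting_spec : Claim_equal_netting := by
  intro g init p ss _ _
  unfold Spec_netting netting netting_alt
  dsimp only
  by_cases hg2 : 2 ≤ g.length
  · obtain ⟨hA, -⟩ := pv_loop_inv g p init ss g.length (by omega)
    obtain ⟨q, M, hq, hrest⟩ := pv_pass_inv g p init ss g.length hg2
    set P := (PySem.List.pyRange 1 (g.length : Int) 1).foldl (prefStep g p) (0, []) with hP
    set mid := (PySem.List.pyRange 1 (g.length : Int) 1).foldl (midStep g p ss) [init] with hmid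
    have hq' : P.2.reverse = q.reverse ++ [P.1] := by rw [hq]; simp
    obtain ⟨s0, rest, hsr⟩ : ∃ s0 rest, P.2.reverse = s0 :: rest := by
      rw [hq']
      cases hqr : q.reverse with
      | nil => exact ⟨P.1, [], by simp⟩
      | cons a b => exact ⟨a, b ++ [P.1], by simp⟩
    obtain ⟨hfold, -⟩ := hrest s0 rest hsr
    rw [hA, hsr]
    dsimp only
    rw [hfold]
    have hdl : ∀ (l : List Int), l.dropLast.reverse = l.reverse.drop 1 := fun l => by
      rw [List.drop_one, List.tail_reverse]
    simp only [List.reverse_append, List.reverse_cons, List.reverse_nil, List.nil_append,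
      ← List.map_reverse, hdl]
    simp
  · have hnil : PySem.List.pyRange 1 (g.length : Int) 1 = [] := by
      apply PySem.List.pyRange_one_eq_nil; omega
    rw [hnil]
    simp
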